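-- pv_equiv track=rewrite | github.com/pypi-data/pypi-mirror-269 | packages/fleece-network/fleece_network-0.2.2-py3-none-any.whl/fleece_network/aiortc/rtcpeerconnection.py | allocate_mid
-- ===== SOURCE A (Python) =====
-- from typing import Any, Dict, List, Optional, Set
--
-- def allocate_mid(mids: Set[str]) -> str:
--     """
--     Allocate a MID which has not been used yet.
--     """
--     i = 0
--     while True:
--         mid = str(i)
--         if mid not in mids:
--             mids.add(mid)
--             return mid
--         i += 1
-- ===== SOURCE B (Python) =====
-- def allocate_mid(mids):
--     # By pigeonhole, some i in 0..len(mids) is free: materialise that bounded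
--     # candidate list, filter out used ones, and take the numeric minimum.
--     free = [i for i in range(len(mids) + 1) if str(i) not in mids]
--     mid = str(min(free))
--     mids.add(mid)
--     return mid
-- ===== Notes on version B (the rewrite author's own statement) =====
-- stated objective: alternative
-- what changed: replaces the unbounded incremental while-loop probe (i=0,1,2,... until str(i) is free) by a bounded materialise-then-select pass: build the candidate list range(len(mids)+1), keep the free ones, return str(min(...)); both mutate mids identically via add
import Mathlib
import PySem

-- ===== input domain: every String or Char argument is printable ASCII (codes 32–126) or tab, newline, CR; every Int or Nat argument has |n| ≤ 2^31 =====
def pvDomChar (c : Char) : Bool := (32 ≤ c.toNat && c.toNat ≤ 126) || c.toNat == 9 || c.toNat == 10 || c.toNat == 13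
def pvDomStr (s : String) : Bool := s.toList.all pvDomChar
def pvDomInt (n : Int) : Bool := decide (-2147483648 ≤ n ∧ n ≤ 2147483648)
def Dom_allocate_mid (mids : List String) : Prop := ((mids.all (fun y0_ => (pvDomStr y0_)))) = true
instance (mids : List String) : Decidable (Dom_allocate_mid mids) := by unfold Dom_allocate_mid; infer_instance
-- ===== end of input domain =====

-- B replaces A's unbounded while-loop probe by a bounded candidate-list/filter/min pass
-- (same return value; both Pythons also add the returned mid to the set — the theorems
-- here are about the RETURN value only).

-- ===== PORT A =====
-- A's `while True` probe; the fuel `mids.length + 1` is only a totality guard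
-- (the proofs show it is never exhausted), the loop body is A's verbatim.
def allocate_mid_loop (mids : List String) : Nat → Int → String
  | 0, _ => ""
  | f + 1, i =>
      let mid := PySem.Int.toStr i
      if mid ∈ mids then allocate_mid_loop mids f (i + 1) else mid

def allocate_mid (mids : List String) : String :=
  allocate_mid_loop mids (mids.length + 1) 0

-- ===== PORT B =====
def allocate_mid_alt (mids : List String) : String :=
  let free := (PySem.List.pyRange 0 ((mids.length : Int) + 1) 1).filter
      (fun i => decide (PySem.Int.toStr i ∉ mids))
  -- min(free): `.getD 0` is a totality guard only; `free` is proven nonempty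
  PySem.Int.toStr ((PySem.List.min? free (fun i => i)).getD 0)

-- ===== PRECONDITION & SPEC =====
def Spec_allocate_mid (mids : List String) (out : String) : Prop := out = allocate_mid_alt mids
instance (mids : List String) (out : String) : Decidable (Spec_allocate_mid mids out) := by unfold Spec_allocate_mid; infer_instance

-- ===== CLAIM (what is proved, stated in full; the proofs are below) =====
def Claim_equal_allocate_mid : Prop := ∀ (mids : List String), Dom_allocate_mid mids → Spec_allocate_mid mids (allocate_mid mids)

-- ===== LEMMAS AND PROOFS =====

-- str is injective on the naturals (digit lists determine the number)
lemma digitChar_inj {a b : Nat} (ha : a < 10) (hb : b < 10) (h : Nat.digitChar a = Nat.digitChar b) : a = b := by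
  interval_cases a <;> interval_cases b <;> simp_all [Nat.digitChar]

lemma toDigits_ten_inj : ∀ (m n : Nat), Nat.toDigits 10 m = Nat.toDigits 10 n → m = n := by
  intro m
  induction m using Nat.strong_induction_on with
  | _ m ih =>
    intro n h
    rcases Nat.lt_or_ge m 10 with hm | hm <;> rcases Nat.lt_or_ge n 10 with hn | hn
    · rw [Nat.toDigits_of_lt_base hm, Nat.toDigits_of_lt_base hn] at h
      exact digitChar_inj hm hn (List.cons.injEq .. ▸ h).1
    · rw [Nat.toDigits_of_lt_base hm, Nat.toDigits_of_base_le (by norm_num) hn] at h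
      have hl := congrArg List.length h
      simp only [List.length_cons, List.length_append, List.length_nil] at hl
      have := Nat.length_toDigits_pos (b := 10) (n := n / 10)
      omega
    · rw [Nat.toDigits_of_base_le (by norm_num) hm, Nat.toDigits_of_lt_base hn] at h
      have hl := congrArg List.length h
      simp only [List.length_cons, List.length_append, List.length_nil] at hl
      have := Nat.length_toDigits_pos (b := 10) (n := m / 10)
      omega
    · rw [Nat.toDigits_of_base_le (by norm_num) hm, Nat.toDigits_of_base_le (by norm_num) hn] at h
      obtain ⟨h1, h2⟩ := List.append_singleton_inj.mp h
      have hq : m / 10 = n / 10 := ih (m / 10) (by omega) _ h1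
      have hr : m % 10 = n % 10 := digitChar_inj (by omega) (by omega) h2
      omega

lemma toStr_inj_nonneg {a b : Int} (ha : 0 ≤ a) (hb : 0 ≤ b)
    (h : PySem.Int.toStr a = PySem.Int.toStr b) : a = b := by
  unfold PySem.Int.toStr PySem.Int.toChars at h
  rw [if_neg (by omega), if_neg (by omega)] at h
  have h2 := congrArg String.toList h
  simp at h2
  have := toDigits_ten_inj _ _ h2
  omega

-- pigeonhole: among str(0)..str(len(mids)) some string is not in mids
lemma exists_free (mids : List String) :
    ∃ k : Nat, k ≤ mids.length ∧ PySem.Int.toStr (k : Int) ∉ mids := by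
  by_contra hc
  push Not at hc
  set L := (List.range (mids.length + 1)).map (fun k : Nat => PySem.Int.toStr (k : Int)) with hL
  have hnd : L.Nodup := by
    refine (List.nodup_range).map ?_
    intro x y hxy
    exact Nat.cast_injective (toStr_inj_nonneg (by positivity) (by positivity) hxy)
  have hsub : L ⊆ mids := by
    intro s hs
    simp [hL] at hs
    obtain ⟨k, hk, rfl⟩ := hs
    exact hc k (by omega)
  have h1 : L.toFinset.card = L.length := List.toFinset_card_of_nodup hnd
  have h2 : L.toFinset ⊆ mids.toFinset := by
    intro x hx; simp at hx ⊢; exact hsub hx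
  have h3 := Finset.card_le_card h2
  have h4 := mids.toFinset_card_le
  have h5 : L.length = mids.length + 1 := by simp [hL]
  omega

-- the least free index
noncomputable def leastFree (mids : List String) : Nat :=
  Nat.find (p := fun k => PySem.Int.toStr (k : Int) ∉ mids)
    ((exists_free mids).imp (fun _ h => h.2))

lemma leastFree_not_mem (mids : List String) :
    PySem.Int.toStr ((leastFree mids : Nat) : Int) ∉ mids := by
  unfold leastFree
  exact Nat.find_spec (p := fun k => PySem.Int.toStr (k : Int) ∉ mids) _

lemma leastFree_min (mids : List String) {j : Nat}
    (h : PySem.Int.toStr (j : Int) ∉ mids) : leastFree mids ≤ j := by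
  unfold leastFree
  exact Nat.find_le (p := fun k => PySem.Int.toStr (k : Int) ∉ mids) h

lemma leastFree_mem_of_lt (mids : List String) {j : Nat} (h : j < leastFree mids) :
    PySem.Int.toStr (j : Int) ∈ mids := by
  have := Nat.find_min (p := fun k => PySem.Int.toStr (k : Int) ∉ mids)
    ((exists_free mids).imp (fun _ h => h.2)) h
  simpa using this

lemma leastFree_le (mids : List String) : leastFree mids ≤ mids.length := by
  obtain ⟨k, hk, hf⟩ := exists_free mids
  exact le_trans (leastFree_min mids hf) hk

lemma loop_eq (mids : List String) :
    ∀ (f i : Nat), i ≤ leastFree mids → leastFree mids < i + f →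
      allocate_mid_loop mids f (i : Int) = PySem.Int.toStr ((leastFree mids : Nat) : Int) := by
  intro f
  induction f with
  | zero => intro i h1 h2; omega
  | succ f ih =>
      intro i h1 h2
      by_cases hc : i = leastFree mids
      · subst hc
        simp [allocate_mid_loop, leastFree_not_mem mids]
      · have hi : i < leastFree mids := lt_of_le_of_ne h1 hc
        have hm := leastFree_mem_of_lt mids hi
        have : ((i : Int) + 1) = ((i + 1 : Nat) : Int) := by push_cast; ring
        simp only [allocate_mid_loop, hm, if_pos, this]
        exact ih (i + 1) (by omega) (by omega)

lemma allocate_mid_eq (mids : List String) :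
    allocate_mid mids = PySem.Int.toStr ((leastFree mids : Nat) : Int) := by
  have := loop_eq mids (mids.length + 1) 0 (by omega)
    (by have := leastFree_le mids; omega)
  simpa [allocate_mid] using this

lemma allocate_mid_alt_eq (mids : List String) :
    allocate_mid_alt mids = PySem.Int.toStr ((leastFree mids : Nat) : Int) := by
  unfold allocate_mid_alt
  set free := (PySem.List.pyRange 0 ((mids.length : Int) + 1) 1).filter
      (fun i => decide (PySem.Int.toStr i ∉ mids)) with hfree
  have hk0 : ((leastFree mids : Nat) : Int) ∈ free := by
    rw [hfree, List.mem_filter]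
    constructor
    · rw [PySem.List.mem_pyRange_one]
      have := leastFree_le mids
      constructor <;> [positivity; exact_mod_cast by omega]
    · simpa using leastFree_not_mem mids
  obtain ⟨m, hm⟩ : ∃ m, PySem.List.min? free (fun i => i) = some m := by
    cases h : PySem.List.min? free (fun i => i) with
    | none =>
        rw [PySem.List.min?_eq_none_iff] at h
        rw [h] at hk0; simp at hk0
    | some m => exact ⟨m, rfl⟩
  have hmem := PySem.List.min?_mem hm
  rw [hfree, List.mem_filter] at hmem
  have hm0 : 0 ≤ m := (PySem.List.mem_pyRange_one.mp hmem.1).1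
  have hmnot : PySem.Int.toStr m ∉ mids := by simpa using hmem.2
  have hle1 : m ≤ ((leastFree mids : Nat) : Int) := PySem.List.min?_isMin hm _ hk0
  have hle2 : leastFree mids ≤ m.toNat := by
    apply leastFree_min
    rwa [Int.toNat_of_nonneg hm0]
  have : m = ((leastFree mids : Nat) : Int) := by omega
  simp only [hm, Option.getD_some, this]

-- ===== VERDICT (by name: the statement is the Claim_ definition above) =====
theorem allocate_mid_spec : Claim_equal_allocate_mid := by
  intro mids _
  unfold Spec_allocate_mid
  rw [allocate_mid_eq, allocate_mid_alt_eq]
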